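-- pv_equiv track=rewrite | github.com/shubhag/NLP | Syllable/syllable.py | create_sorted_tuple
-- ===== SOURCE A (Python) =====
-- def create_sorted_tuple(dictionary):
-- 	dictCount = dict()
-- 	for item in dictionary:
-- 		dictCount[item] = dictCount.get(item,0) + 1
--
-- 	tuple_array = []
-- 	for k,v in dictCount.items():
-- 		tuple_array.append((v, k))
-- 	tuple_array = sorted(tuple_array, reverse=True)
-- 	return tuple_array
-- ===== SOURCE B (Python) =====
-- def create_sorted_tuple(dictionary):
-- 	# Sort the input, then scan runs of equal consecutive items to count them.
-- 	s = sorted(dictionary)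
-- 	tuple_array = []
-- 	i = 0
-- 	n = len(s)
-- 	while i < n:
-- 		j = i + 1
-- 		while j < n and s[j] == s[i]:
-- 			j += 1
-- 		tuple_array.append((j - i, s[i]))
-- 		i = j
-- 	return sorted(tuple_array, reverse=True)
-- ===== Notes on version B (the rewrite author's own statement) =====
-- stated objective: alternative
-- what changed: Replaces the hash-map counter with sort-then-group: the input is sorted once and runs of equal consecutive items are counted in a single scan, so no dictionary is built at all.
import Mathlib
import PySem

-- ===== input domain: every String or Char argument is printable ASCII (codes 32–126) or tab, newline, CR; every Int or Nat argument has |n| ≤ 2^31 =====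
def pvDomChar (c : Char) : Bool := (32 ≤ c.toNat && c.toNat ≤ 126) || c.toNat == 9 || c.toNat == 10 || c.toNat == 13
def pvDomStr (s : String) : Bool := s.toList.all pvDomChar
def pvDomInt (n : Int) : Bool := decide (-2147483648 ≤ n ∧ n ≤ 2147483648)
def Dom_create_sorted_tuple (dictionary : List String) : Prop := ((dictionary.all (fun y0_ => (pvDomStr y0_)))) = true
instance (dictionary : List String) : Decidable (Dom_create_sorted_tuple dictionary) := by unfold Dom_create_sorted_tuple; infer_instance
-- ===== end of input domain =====

-- B replaces A's hash-map counter with sort-then-group (count runs of equal consecutive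
-- items in the sorted input); same return value, no dictionary built (objective: alternative).

-- ===== PORT A =====
-- dictCount = {}; for item: dictCount[item] = dictCount.get(item,0)+1;
-- tuple_array = [(v,k) for k,v in dictCount.items()]; return sorted(tuple_array, reverse=True)
def create_sorted_tuple (dictionary : List String) : List (Int × String) :=
  let dictCount := dictionary.foldl (fun d item => d.insert item (d.getD item 0 + 1)) PySem.Dict.empty
  let tuple_array := dictCount.items.foldl (fun acc kv => acc ++ [(kv.2, kv.1)]) []
  PySem.List.sorted2 tuple_array (fun p => p.1) (fun p => p.2) true

-- ===== PORT B =====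
-- Source B's while loop over the sorted list: at position i it scans the run of items equal to
-- s[i] (inner while = takeWhile), emits (run length, s[i]) and jumps to the end of the run
-- (i = j = dropWhile); ported as the standard suffix recursion for an index loop.
def pvGroups (s : List String) : List (Int × String) :=
  match s with
  | [] => []
  | x :: t =>
      ((((t.takeWhile (fun y => y == x)).length + 1 : Nat) : Int), x)
        :: pvGroups (t.dropWhile (fun y => y == x))
termination_by s.length
decreasing_by
  simp only [List.length_cons]
  exact Nat.lt_succ_of_le (List.length_dropWhile_le _ t)

def create_sorted_tuple_alt (dictionary : List String) : List (Int × String) :=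
  let s := PySem.List.sorted dictionary (fun x => x) false
  let tuple_array := pvGroups s
  PySem.List.sorted2 tuple_array (fun p => p.1) (fun p => p.2) true

-- ===== PRECONDITION & SPEC =====
def Spec_create_sorted_tuple (dictionary : List String) (out : List (Int × String)) : Prop := out = create_sorted_tuple_alt dictionary
instance (dictionary : List String) (out : List (Int × String)) : Decidable (Spec_create_sorted_tuple dictionary out) := by unfold Spec_create_sorted_tuple; infer_instance

-- ===== CLAIM (what is proved, stated in full; the proofs are below) =====
def Claim_equal_create_sorted_tuple : Prop := ∀ (dictionary : List String), Dom_create_sorted_tuple dictionary → Spec_create_sorted_tuple dictionary (create_sorted_tuple dictionary)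

-- ===== LEMMAS AND PROOFS =====

-- sorted(_, reverse=True) with Python's lexicographic tuple comparison is sorting by the Lex key.
theorem pv_sorted2_eq_sorted_lex (xs : List (Int × String)) :
    PySem.List.sorted2 xs (fun p => p.1) (fun p => p.2) true
      = PySem.List.sorted xs (fun p => toLex p) true := by
  have h : ∀ a b : Int × String,
      (decide (a.1 < b.1) || (!decide (b.1 < a.1) && decide (a.2 < b.2)))
        = decide (toLex a < toLex b) := by
    intro a b
    rcases lt_trichotomy a.1 b.1 with h | h | h
    · simp [h, Prod.Lex.toLex_lt_toLex, not_lt_of_gt h]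
    · simp [h, Prod.Lex.toLex_lt_toLex]
    · simp [h, Prod.Lex.toLex_lt_toLex, not_lt_of_gt h, ne_of_gt h]
  have h2 : (fun (a b : Int × String) =>
        decide (b.1 < a.1) || (!decide (a.1 < b.1) && decide (b.2 < a.2)))
      = fun a b => decide (toLex b < toLex a) := funext fun a => funext fun b => h b a
  simp only [PySem.List.sorted2, PySem.List.sorted, reduceIte]
  rw [h2]

-- reverse-sorting is permutation-invariant when the key is injective and the list has no duplicates
theorem pv_sorted_rev_perm_congr {xs ys : List (Int × String)}
    (hnd : xs.Nodup) (hp : ys.Perm xs) :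
    PySem.List.sorted ys (fun p => toLex p) true
      = PySem.List.sorted xs (fun p => toLex p) true := by
  have hzp : (PySem.List.sorted xs (fun p => toLex p) true).Perm xs :=
    PySem.List.sorted_perm xs _ true
  have hpw : (PySem.List.sorted xs (fun p => toLex p) true).Pairwise
      (fun a b => toLex b ≤ toLex a) := PySem.List.sorted_pairwise_rev xs _
  have hznd : (PySem.List.sorted xs (fun p => toLex p) true).Nodup := hzp.nodup_iff.mpr hnd
  have hgt : (PySem.List.sorted xs (fun p => toLex p) true).Pairwise
      (fun a b => toLex b < toLex a) := by
    have := hznd.imp_of_mem (fun {a b} _ _ h => h) |>.and hpw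
    exact this.imp (fun {a b} h => lt_of_le_of_ne h.2 (fun he => h.1 (toLex.injective he).symm))
  exact PySem.List.sorted_rev_eq_of_perm_of_pairwise_gt ys _ _ (hzp.trans hp.symm) hgt

-- in a sorted list x :: t, everything after the initial run of x is strictly greater than x
theorem pv_dropWhile_gt (x : String) (t : List String)
    (hs : (x :: t).Pairwise (· ≤ ·)) :
    ∀ z ∈ t.dropWhile (fun y => y == x), x < z := by
  induction t with
  | nil => intro z hz; simp [List.dropWhile] at hz
  | cons y t' ih =>
    rcases List.pairwise_cons.mp hs with ⟨hx, ht⟩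
    by_cases hyx : y = x
    · intro z hz
      rw [List.dropWhile_cons, if_pos (by simp [hyx])] at hz
      exact ih (List.pairwise_cons.mpr ⟨fun z hz => hx z (List.mem_cons_of_mem _ hz),
        (List.pairwise_cons.mp ht).2⟩) z hz
    · intro z hz
      rw [List.dropWhile_cons, if_neg (by simp [hyx])] at hz
      have hxy : x < y := lt_of_le_of_ne (hx y (List.mem_cons_self)) (Ne.symm hyx)
      rcases List.mem_cons.mp hz with rfl | hz'
      · exact hxy
      · exact lt_of_lt_of_le hxy ((List.pairwise_cons.mp ht).1 z hz')

-- set(x :: a ++ b) = x :: set(b) when a is all x's and x is not in b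
theorem pv_ofList_run (x : String) (a b : List String)
    (ha : ∀ y ∈ a, y = x) (hb : x ∉ b) :
    PySem.Set.ofList (x :: (a ++ b)) = x :: PySem.Set.ofList b := by
  have hbnotm : x ∉ PySem.Set.ofList b := fun h => hb ((PySem.Set.mem_ofList _ _).mp h)
  have hdisc : ∀ s : List String, x ∉ s → List.filter (fun y => !(y == x)) s = s := by
    intro s hxs
    refine List.filter_eq_self.mpr (fun y hy => ?_)
    have : y ≠ x := fun he => hxs (he ▸ hy)
    simp [this]
  rw [PySem.Set.ofList_cons]
  congr 1
  rw [PySem.Set.ofList_append]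
  cases a with
  | nil =>
    have h0 : PySem.Set.ofList ([] : List String) = [] := rfl
    rw [h0, PySem.Set.update_nil_left]
    exact hdisc _ hbnotm
  | cons a0 a' =>
    have hala : PySem.Set.ofList (a0 :: a') = [x] := by
      have key : ∀ (l : List String), (∀ y ∈ l, y = x) →
          PySem.Set.ofList l = [] ∨ PySem.Set.ofList l = [x] := by
        intro l hl
        induction l with
        | nil => left; rfl
        | cons z l' ih =>
          rcases ih (fun y hy => hl y (List.mem_cons_of_mem _ hy)) with h | h <;>
            rw [PySem.Set.ofList_cons, hl z List.mem_cons_self, h] <;> right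
          · rfl
          · simp [PySem.Set.discard]
      rcases key (a0 :: a') ha with h | h
      · exact absurd h (by simp [PySem.Set.ofList_cons])
      · exact h
    rw [hala, PySem.Set.update_eq_append_filter]
    have hfil : List.filter (fun y => !PySem.Set.contains [x] y) (PySem.Set.ofList b)
        = PySem.Set.ofList b := by
      refine List.filter_eq_self.mpr (fun y hy => ?_)
      have : y ≠ x := fun he => hbnotm (he ▸ hy)
      simp [PySem.Set.contains, this]
    rw [hfil]
    show PySem.Set.discard (x :: PySem.Set.ofList b) x = PySem.Set.ofList b
    simp only [PySem.Set.discard, List.filter_cons]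
    rw [if_neg (by simp)]
    exact hdisc _ hbnotm

-- the grouping scan over a sorted list produces (count, item) for each distinct item
theorem pv_groups_sorted (s : List String) (hs : s.Pairwise (· ≤ ·)) :
    pvGroups s = (PySem.Set.ofList s).map (fun k => (((s.count k : Nat) : Int), k)) := by
  induction s using pvGroups.induct with
  | case1 => simp [pvGroups]
  | case2 x t ih =>
    set a := t.takeWhile (fun y => y == x) with hadef
    set b := t.dropWhile (fun y => y == x) with hbdef
    have hab : a ++ b = t := List.takeWhile_append_dropWhile
    have ha : ∀ y ∈ a, y = x := fun y hy => by
      simpa using List.mem_takeWhile_imp hy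
    have hbgt : ∀ z ∈ b, x < z := pv_dropWhile_gt x t hs
    have hxb : x ∉ b := fun h => lt_irrefl x (hbgt x h)
    have hbsorted : b.Pairwise (· ≤ ·) :=
      List.Pairwise.sublist ((List.dropWhile_sublist _).trans (List.sublist_cons_self x t)) hs
    have hset : PySem.Set.ofList (x :: t) = x :: PySem.Set.ofList b := by
      rw [show (x :: t) = x :: (a ++ b) by rw [hab]]
      exact pv_ofList_run x a b ha hxb
    have hcx : (x :: t).count x = a.length + 1 := by
      rw [show (x :: t) = x :: (a ++ b) by rw [hab]]
      rw [List.count_cons_self, List.count_append,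
        List.count_eq_length.mpr (fun y hy => (ha y hy).symm),
        List.count_eq_zero.mpr hxb]
    have hck : ∀ k ∈ b, (x :: t).count k = b.count k := by
      intro k hk
      have hkx : k ≠ x := fun he => hxb (he ▸ hk)
      rw [show (x :: t) = x :: (a ++ b) by rw [hab]]
      rw [List.count_cons_of_ne (Ne.symm hkx), List.count_append,
        List.count_eq_zero.mpr (fun hka => hkx (ha k hka)), Nat.zero_add]
    rw [pvGroups, hset, List.map_cons, ← hadef, ← hbdef, ih hbsorted, hcx]
    congr 1
    refine List.map_congr_left (fun k hk => ?_)
    rw [hck k ((PySem.Set.mem_ofList _ _).mp hk)]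

-- A's tuple_array is [(count(k), k) for k in set(dictionary)]
theorem pv_tupleA (dictionary : List String) :
    (List.foldl (fun d item => d.insert item (d.getD item 0 + 1)) PySem.Dict.empty dictionary).items.foldl
        (fun acc kv => acc ++ [(kv.2, kv.1)]) []
      = (PySem.Set.ofList dictionary).map (fun k => (((dictionary.count k : Nat) : Int), k)) := by
  rw [PySem.Dict.foldl_insert_getD_add_one_eq_counter, PySem.List.foldl_append_singleton_eq_map,
    PySem.Dict.items_counter, List.map_map]
  rfl

-- ===== VERDICT (by name: the statement is the Claim_ definition above) =====
theorem create_sorted_tuple_spec : Claim_equal_create_sorted_tuple := by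
  intro dictionary _
  simp only [Spec_create_sorted_tuple, create_sorted_tuple, create_sorted_tuple_alt]
  rw [pv_tupleA, pv_groups_sorted (PySem.List.sorted dictionary (fun x => x) false)
    (by simpa using PySem.List.sorted_pairwise dictionary (fun x => x)),
    pv_sorted2_eq_sorted_lex, pv_sorted2_eq_sorted_lex]
  -- the two pair lists are permutations of each other, with no duplicate pairs
  have hpermset : (PySem.Set.ofList (PySem.List.sorted dictionary (fun x => x) false)).Perm
      (PySem.Set.ofList dictionary) := by
    refine (List.perm_ext_iff_of_nodup (PySem.Set.nodup_ofList _) (PySem.Set.nodup_ofList _)).mpr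
      (fun k => ?_)
    simp [PySem.Set.mem_ofList, PySem.List.mem_sorted]
  have hc : ∀ k, (PySem.List.sorted dictionary (fun x => x) false).count k = dictionary.count k :=
    fun k => (PySem.List.sorted_perm dictionary (fun x => x) false).count_eq k
  have hperm : ((PySem.Set.ofList (PySem.List.sorted dictionary (fun x => x) false)).map
        (fun k => ((((PySem.List.sorted dictionary (fun x => x) false).count k : Nat) : Int), k))).Perm
      ((PySem.Set.ofList dictionary).map (fun k => (((dictionary.count k : Nat) : Int), k))) := by
    have := hpermset.map (fun k => (((dictionary.count k : Nat) : Int), k))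
    refine List.Perm.trans ?_ this
    rw [List.map_congr_left (fun k _ => by rw [hc k])]
  have hnd : ((PySem.Set.ofList dictionary).map
      (fun k => (((dictionary.count k : Nat) : Int), k))).Nodup :=
    (PySem.Set.nodup_ofList _).map (fun k₁ k₂ h => congrArg Prod.snd h)
  exact (pv_sorted_rev_perm_congr hnd hperm).symm
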